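-- pv_equiv track=rewrite | github.com/gadido30/myscripts | python_clean_script.py | filter_versions
-- ===== SOURCE A (Python) =====
-- from collections import defaultdict
--
-- def filter_versions(versions):
--     """
--     Filter versions to keep the latest 2 minor version groups (excluding 1.0.0x).
--     Returns a tuple of (versions_to_keep, versions_to_delete).
--     """
--     # Filter out 1.0.0x versions and group by first 5 characters
--     filtered_versions = [v for v in versions if v[:5] != "1.0.0"]
--
--     # Group by first 5 characters (e.g., "1.0.1", "1.0.2", "1.1.0")
--     groups = defaultdict(list)
--     for version in filtered_versions:
--         group_key = version[:5]
--         groups[group_key].append(version)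
--
--     # Sort groups by key in descending order and take first 2
--     sorted_groups = sorted(groups.items(), key=lambda x: x[0], reverse=True)
--     top_2_groups = sorted_groups[:2]
--
--     # Flatten the top 2 groups to get versions to keep
--     to_keep = []
--     for _, group_versions in top_2_groups:
--         to_keep.extend(group_versions)
--
--     # Get versions to delete (everything not in to_keep)
--     to_delete = [v for v in versions if v not in to_keep]
--
--     return to_keep, to_delete
-- ===== SOURCE B (Python) =====
-- def filter_versions(versions):
--     """
--     Filter versions to keep the latest 2 minor version groups (excluding 1.0.0x).
--     Returns a tuple of (versions_to_keep, versions_to_delete).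
--     """
--     filtered = [v for v in versions if v[:5] != "1.0.0"]
--     # top-2 group keys, via a set of keys instead of a grouping dict
--     top = sorted({v[:5] for v in filtered}, reverse=True)[:2]
--     # one filtering pass per kept key reproduces group-then-original order
--     to_keep = [v for k in top for v in filtered if v[:5] == k]
--     # key membership is equivalent to A's value membership in to_keep
--     to_delete = [v for v in versions if v[:5] not in top]
--     return to_keep, to_delete
-- ===== Notes on version B (the rewrite author's own statement) =====
-- stated objective: simpler
-- what changed: B drops A's defaultdict grouping, items-sort and flatten: it sorts the set of 5-char group keys descending, takes the top 2, builds to_keep with one filter pass per kept key, and builds to_delete by key membership in the top-2 set instead of A's value membership in to_keep.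
import Mathlib
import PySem

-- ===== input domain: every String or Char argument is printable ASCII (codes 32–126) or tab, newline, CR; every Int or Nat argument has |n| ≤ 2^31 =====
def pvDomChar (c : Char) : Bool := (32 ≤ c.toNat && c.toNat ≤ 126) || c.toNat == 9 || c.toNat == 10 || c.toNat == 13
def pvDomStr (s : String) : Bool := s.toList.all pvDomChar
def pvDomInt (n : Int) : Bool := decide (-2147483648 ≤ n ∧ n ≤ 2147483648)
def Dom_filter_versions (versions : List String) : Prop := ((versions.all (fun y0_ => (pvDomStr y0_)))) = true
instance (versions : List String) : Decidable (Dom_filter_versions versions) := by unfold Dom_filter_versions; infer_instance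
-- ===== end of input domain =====

-- B replaces A's defaultdict grouping + items-sort + flatten + value-membership delete test by a
-- sorted set of the top-2 group keys, one filtering pass per kept key, and a key-membership delete
-- test (objective: simpler).

-- ===== PORT A =====
-- v[:5]
def pvKey (v : String) : String := PySem.Str.slice v none (some 5)

def filter_versions (versions : List String) : List String × List String :=
  let filtered_versions := versions.filter (fun v => pvKey v != "1.0.0")
  let groups := filtered_versions.foldl
    (fun d version => d.modify (pvKey version) [] (fun g => g ++ [version]))
    (PySem.Dict.empty : PySem.Dict String (List String))
  let sorted_groups := PySem.List.sorted groups.items (fun x => x.1) true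
  let top_2_groups := PySem.List.slice sorted_groups none (some 2)
  let to_keep := top_2_groups.foldl (fun acc p => acc ++ p.2) []
  let to_delete := versions.filter (fun v => !(to_keep.contains v))
  (to_keep, to_delete)

-- ===== PORT B =====
def filter_versions_alt (versions : List String) : List String × List String :=
  let filtered := versions.filter (fun v => pvKey v != "1.0.0")
  let top := PySem.List.slice
    (PySem.List.sorted (PySem.Set.ofList (filtered.map pvKey)) (fun k => k) true) none (some 2)
  let to_keep := top.flatMap (fun k => filtered.filter (fun v => pvKey v == k))
  let to_delete := versions.filter (fun v => !(top.contains (pvKey v)))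
  (to_keep, to_delete)

-- ===== PRECONDITION & SPEC =====
def Spec_filter_versions (versions : List String) (out : List String × List String) : Prop := out = filter_versions_alt versions
instance (versions : List String) (out : List String × List String) : Decidable (Spec_filter_versions versions out) := by unfold Spec_filter_versions; infer_instance

-- ===== CLAIM (what is proved, stated in full; the proofs are below) =====
def Claim_equal_filter_versions : Prop := ∀ (versions : List String), Dom_filter_versions versions → Spec_filter_versions versions (filter_versions versions)

-- ===== LEMMAS AND PROOFS =====

-- A's grouping loop, read through pairs (key v, v)
theorem pv_getD_groups (F : List String) (c : String) :
    (F.foldl (fun d v => d.modify (pvKey v) [] (fun g => g ++ [v]))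
      (PySem.Dict.empty : PySem.Dict String (List String))).getD c []
      = F.filter (fun v => pvKey v == c) := by
  have h := PySem.Dict.getD_foldl_modify_append
    (F.map (fun v => (pvKey v, v))) (PySem.Dict.empty : PySem.Dict String (List String)) c
  rw [List.foldl_map] at h
  rw [h]
  simp [List.filter_map, List.map_map, Function.comp_def, PySem.Dict.getD, PySem.Dict.get?,
    PySem.Dict.empty]

theorem pv_keys_groups (F : List String) :
    (F.foldl (fun d v => d.modify (pvKey v) [] (fun g => g ++ [v]))
      (PySem.Dict.empty : PySem.Dict String (List String))).keys
      = PySem.Set.ofList (F.map pvKey) := by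
  have h := PySem.Dict.keys_foldl_modify_key F pvKey [] (fun _ v => (fun g => g ++ [v]))
    (PySem.Dict.empty : PySem.Dict String (List String))
  simpa [PySem.Set.update, PySem.Set.ofList, PySem.Dict.empty, PySem.Dict.keys] using h

theorem pv_nodup_keys_groups (F : List String) :
    (F.foldl (fun d v => d.modify (pvKey v) [] (fun g => g ++ [v]))
      (PySem.Dict.empty : PySem.Dict String (List String))).keys.Nodup := by
  exact PySem.Dict.nodup_keys_foldl_modify_key F pvKey [] (fun _ v => (fun g => g ++ [v])) _
    PySem.Dict.nodup_keys_empty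

-- sorted(set(L), reverse=True) is strictly decreasing
theorem pv_sk_pairwise (L : List String) :
    (PySem.List.sorted (PySem.Set.ofList L) (fun k => k) true).Pairwise (fun a b => b < a) := by
  have hnd : (PySem.List.sorted (PySem.Set.ofList L) (fun k : String => k) true).Nodup :=
    (PySem.List.sorted_perm _ _ _).nodup_iff.mpr (PySem.Set.nodup_ofList L)
  have hle := PySem.List.sorted_pairwise_rev (PySem.Set.ofList L) (fun k : String => k)
  exact (hle.and hnd).imp (fun h => lt_of_le_of_ne h.1 (Ne.symm h.2))

-- A's sorted dict items coincide with B's sorted key set, paired with the per-key filters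
theorem pv_sorted_items (F : List String) :
    PySem.List.sorted
      ((F.foldl (fun d v => d.modify (pvKey v) [] (fun g => g ++ [v]))
        (PySem.Dict.empty : PySem.Dict String (List String))).items) (fun x => x.1) true
    = (PySem.List.sorted (PySem.Set.ofList (F.map pvKey)) (fun k => k) true).map
        (fun k => (k, F.filter (fun v => pvKey v == k))) := by
  set G := F.foldl (fun d v => d.modify (pvKey v) [] (fun g => g ++ [v]))
    (PySem.Dict.empty : PySem.Dict String (List String)) with hG
  have hitems : G.items = (PySem.Set.ofList (F.map pvKey)).map
      (fun k => (k, F.filter (fun v => pvKey v == k))) := by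
    have h := PySem.Dict.items_eq_map_keys G (pv_nodup_keys_groups F) []
    rw [pv_keys_groups F] at h
    rw [h]
    exact List.map_congr_left (fun k _ => by rw [pv_getD_groups F k])
  apply PySem.List.sorted_rev_eq_of_perm_of_pairwise_gt
  · rw [hitems]
    exact (PySem.List.sorted_perm (PySem.Set.ofList (F.map pvKey)) (fun k => k) true).map _
  · rw [List.pairwise_map]
    exact pv_sk_pairwise (F.map pvKey)

-- key-membership in top equals value-membership in A's to_keep, for v ∈ versions
theorem pv_mem_keep (versions : List String) (top : List String) (v : String)
    (htop : ∀ k ∈ top, k ∈ (versions.filter (fun v => pvKey v != "1.0.0")).map pvKey)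
    (hv : v ∈ versions) :
    (v ∈ top.flatMap (fun k => (versions.filter (fun v => pvKey v != "1.0.0")).filter
        (fun v => pvKey v == k)))
      ↔ pvKey v ∈ top := by
  constructor
  · rintro h
    rcases List.mem_flatMap.mp h with ⟨k, hk, hvk⟩
    rcases List.mem_filter.mp hvk with ⟨_, he⟩
    rw [eq_of_beq he]; exact hk
  · intro h
    refine List.mem_flatMap.mpr ⟨pvKey v, h, List.mem_filter.mpr ⟨?_, by simp⟩⟩
    rcases List.mem_map.mp (htop _ h) with ⟨u, hu, hku⟩
    have hne : (pvKey u != "1.0.0") = true := (List.mem_filter.mp hu).2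
    exact List.mem_filter.mpr ⟨hv, by rw [hku] at hne; exact hne⟩

theorem filter_versions_eq (versions : List String) :
    filter_versions versions = filter_versions_alt versions := by
  simp only [filter_versions, filter_versions_alt]
  set F := versions.filter (fun v => pvKey v != "1.0.0") with hF
  set sk := PySem.List.sorted (PySem.Set.ofList (F.map pvKey)) (fun k => k) true with hsk
  rw [pv_sorted_items F]
  rw [show ((2 : Int) = ((2 : Nat) : Int)) from rfl, PySem.List.slice_to_natCast,
    PySem.List.slice_to_natCast, ← List.map_take]
  set top := sk.take 2 with htop
  rw [PySem.List.foldl_append_eq_flatMap (fun p : String × List String => p.2), List.flatMap_map]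
  simp only [List.nil_append]
  have htopmem : ∀ k ∈ top, k ∈ F.map pvKey := by
    intro k hk
    have hks : k ∈ sk := List.mem_of_mem_take hk
    rw [hsk] at hks
    simp only [PySem.List.mem_sorted, PySem.Set.mem_ofList] at hks
    exact hks
  refine Prod.ext rfl ?_
  refine List.filter_congr (fun v hv => ?_)
  have h := pv_mem_keep versions top v htopmem hv
  rw [← hF] at h
  exact congrArg (fun b => !b) (Bool.eq_iff_iff.mpr (by simpa [List.contains_iff_mem, List.mem_filter, bne_iff_ne] using h))

-- ===== VERDICT (by name: the statement is the Claim_ definition above) =====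
theorem filter_versions_spec : Claim_equal_filter_versions := by
  intro versions _
  unfold Spec_filter_versions
  exact filter_versions_eq versions
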